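-- pv_equiv track=rewrite | github.com/LukasJrrrdimmm/Transmission-Simulator | Pymodulator/filtering_hibrid.py | eqalising2pow
-- ===== SOURCE A (Python) =====
-- def eqalising2pow(l, M):
-- 	i = M
-- 	a = 2**M
-- 	while 1:
-- 		if a % i == 0:
-- 			break
-- 		else:
-- 			i -= 1
-- 			a = 2**i
-- 	return a
-- ===== SOURCE B (Python) =====
-- def eqalising2pow(l, M):
--     # largest power of two p <= M; 2**p is the largest 2**i (i <= M) with i | 2**i
--     p = 1 << (M.bit_length() - 1)
--     return 1 << p
-- ===== Notes on version B (the rewrite author's own statement) =====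
-- stated objective: faster
-- what changed: Replaces the descending trial loop (recomputing 2**i each step) by the closed form: the largest i<=M dividing 2**i is the largest power of two <=M, obtained from M.bit_length(), so B does two shifts instead of O(M) big-int exponentiations.
-- outside the precondition, e.g. on eqalising2pow(0, -1): A returns 0.0, B returns 2
import Mathlib
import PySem

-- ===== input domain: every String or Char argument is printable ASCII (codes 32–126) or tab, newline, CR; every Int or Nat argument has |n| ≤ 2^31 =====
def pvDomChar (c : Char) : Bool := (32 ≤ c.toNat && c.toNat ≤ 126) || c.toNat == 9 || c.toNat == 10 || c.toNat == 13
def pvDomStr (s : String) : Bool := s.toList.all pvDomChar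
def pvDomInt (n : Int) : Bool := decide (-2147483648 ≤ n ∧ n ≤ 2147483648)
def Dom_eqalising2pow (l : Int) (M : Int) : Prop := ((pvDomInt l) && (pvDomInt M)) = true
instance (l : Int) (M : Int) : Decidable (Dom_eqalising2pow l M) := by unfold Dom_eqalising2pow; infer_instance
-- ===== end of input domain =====

-- B replaces A's descending divisibility-trial loop by a bit-length closed form (measured asymptotically faster).

-- ===== PORT A =====
-- the 'while 1' loop: i counts down from M, a = 2**i; fuel M.toNat+1 bounds the ≤ M iterations
def eqaLoop : Nat → Int → Int → Int
  | 0, _, a => a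
  | fuel + 1, i, a =>
      if PySem.Int.mod a i = 0 then a
      else eqaLoop fuel (i - 1) (2 ^ (i - 1).toNat)

def eqalising2pow (l : Int) (M : Int) : Int :=
  eqaLoop (M.toNat + 1) M (2 ^ M.toNat)

-- ===== PORT B =====
def eqalising2pow_alt (l : Int) (M : Int) : Int :=
  2 ^ (2 ^ (PySem.Int.bitLength M - 1))

-- ===== PRECONDITION & SPEC =====
-- Pre_ excludes M ≤ 0: at M = 0 the Python A raises ZeroDivisionError, and for M < 0
-- 2**M is a float, so A returns a float (0.0), never an int.
def Pre_eqalising2pow (l : Int) (M : Int) : Prop := 1 ≤ M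
instance (l : Int) (M : Int) : Decidable (Pre_eqalising2pow l M) := by unfold Pre_eqalising2pow; infer_instance
def pvWitness_eqalising2pow : Int × Int := (0, 5)

def Spec_eqalising2pow (l : Int) (M : Int) (out : Int) : Prop := out = eqalising2pow_alt l M
instance (l : Int) (M : Int) (out : Int) : Decidable (Spec_eqalising2pow l M out) := by unfold Spec_eqalising2pow; infer_instance

-- ===== CLAIM (what is proved, stated in full; the proofs are below) =====
def Claim_equal_eqalising2pow : Prop := ∀ (l : Int) (M : Int), Dom_eqalising2pow l M → Pre_eqalising2pow l M → Spec_eqalising2pow l M (eqalising2pow l M)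

-- ===== LEMMAS AND PROOFS =====

-- a positive j divides 2^j iff j is a power of two
theorem pv_dvd_two_pow_iff (j : Nat) (hj : 1 ≤ j) : j ∣ 2 ^ j ↔ ∃ k, j = 2 ^ k := by
  constructor
  · intro h
    obtain ⟨k, _, hk⟩ := (Nat.dvd_prime_pow Nat.prime_two).1 h
    exact ⟨k, hk⟩
  · rintro ⟨k, rfl⟩
    exact pow_dvd_pow 2 (Nat.le_of_lt (Nat.lt_two_pow_self))

-- the loop, started at j with a = 2^j, returns 2^P where P is the target power of two
theorem pv_loop_eq (m s : Nat) (hm : m < 2 ^ s) (hs : 1 ≤ s) :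
    ∀ (fuel j : Nat), 2 ^ (s - 1) ≤ j → j ≤ m → j - 2 ^ (s - 1) < fuel →
      eqaLoop fuel (j : Int) (2 ^ j) = 2 ^ (2 ^ (s - 1)) := by
  intro fuel
  induction fuel with
  | zero => intro j _ _ h; omega
  | succ n ih =>
    intro j hPj hjm hfuel
    have hj1 : 1 ≤ j := le_trans (Nat.one_le_two_pow) hPj
    have hguard : PySem.Int.mod ((2 : Int) ^ j) (j : Int) = 0 ↔ j ∣ 2 ^ j := by
      rw [PySem.Int.mod_eq_zero_iff_dvd]
      constructor
      · intro h; exact_mod_cast h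
      · intro h; exact_mod_cast h
    show eqaLoop (n + 1) (j : Int) (2 ^ j) = _
    rw [eqaLoop]
    by_cases hdvd : j ∣ 2 ^ j
    · -- guard true: j must be exactly 2^(s-1)
      have hj : j = 2 ^ (s - 1) := by
        obtain ⟨k, rfl⟩ := (pv_dvd_two_pow_iff j hj1).1 hdvd
        have : k ≤ s - 1 := by
          by_contra hk
          have : 2 ^ s ≤ 2 ^ k := Nat.pow_le_pow_right (by norm_num) (by omega)
          omega
        have : 2 ^ k ≤ 2 ^ (s - 1) := Nat.pow_le_pow_right (by norm_num) this
        omega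
      rw [if_pos (hguard.2 hdvd), hj]
    · -- guard false: step to j-1; 2^(s-1) itself divides 2^(2^(s-1)), so j > 2^(s-1)
      have hPdvd : 2 ^ (s - 1) ∣ 2 ^ (2 ^ (s - 1)) :=
        (pv_dvd_two_pow_iff _ Nat.one_le_two_pow).2 ⟨s - 1, rfl⟩
      have hPlt : 2 ^ (s - 1) < j := lt_of_le_of_ne hPj (fun h => hdvd (h ▸ hPdvd))
      have hcast : (j : Int) - 1 = ((j - 1 : Nat) : Int) := by omega
      have htn : ((j : Int) - 1).toNat = j - 1 := by omega
      rw [if_neg (fun h => hdvd (hguard.1 h)), hcast]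
      simp only [Int.toNat_natCast]
      exact ih (j - 1) (by omega) (by omega) (by omega)

-- ===== VERDICT (by name: the statement is the Claim_ definition above) =====
theorem eqalising2pow_spec : Claim_equal_eqalising2pow := by
  intro l M _ hM
  replace hM : 1 ≤ M := hM
  unfold Spec_eqalising2pow eqalising2pow eqalising2pow_alt
  have hMm : ((M.toNat : Nat) : Int) = M := by omega
  obtain ⟨s, hs⟩ : ∃ s, PySem.Int.bitLength M = s := ⟨_, rfl⟩
  have hmlt : M.toNat < 2 ^ s := by
    have h := PySem.Int.lt_two_pow_bitLength M
    rw [hs] at h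
    omega
  have hPle : 2 ^ (s - 1) ≤ M.toNat := by
    have h := PySem.Int.two_pow_bitLength_le M (by omega)
    rw [hs] at h
    omega
  have hs1 : 1 ≤ s := by
    rcases Nat.eq_zero_or_pos s with h | h
    · subst h
      simp only [pow_zero] at hmlt
      omega
    · exact h
  have key := pv_loop_eq M.toNat s hmlt hs1 (M.toNat + 1) M.toNat hPle (le_refl _) (Nat.lt_succ_of_le (Nat.sub_le _ _))
  rw [hMm] at key
  rw [hs]
  exact key
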